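-- pv_equiv track=rewrite | github.com/Fortunoxx/AdventOfCode2023 | src/day06.py | solve_time_dist
-- ===== SOURCE A (Python) =====
-- def solve_time_dist(time, dist):
--     results = []
--     for button_press_duration in range(0, time): # maybe optimize since 0 and time won't work at all
--         time_left = time - button_press_duration
--         result = calc_dist(button_press_duration, time_left)
--         if result > dist:
--             results.append(button_press_duration)
--     return results
--
-- def calc_dist(speed, time_left):
--     return speed * time_left
-- ===== SOURCE B (Python) =====
-- def solve_time_dist(time, dist):
--     # Binary search for the first winning press on the rising half of the
--     # concave distance curve, then use symmetry b*(time-b) == (time-b)*b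
--     # to get the last winning press; the answer is one contiguous range.
--     if time <= 0:
--         return []
--     mid = time // 2
--     if mid * (time - mid) <= dist:
--         return []
--     lo, hi = 0, mid
--     while lo < hi:
--         m = _mid(lo, hi)
--         if m * (time - m) > dist:
--             hi = m
--         else:
--             lo = m + 1
--     first = lo
--     last = time - first if first > 0 else time - 1
--     return list(range(first, last + 1))
--
--
-- def _mid(lo, hi):
--     return (lo + hi) // 2
-- ===== Notes on version B (the rewrite author's own statement) =====
-- stated objective: faster
-- what changed: Replaces the O(time) scan of all press durations with an O(log time) binary search for the first winning duration on the rising half of the concave distance curve, derives the last by symmetry, and emits the contiguous range directly.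
import Mathlib
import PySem

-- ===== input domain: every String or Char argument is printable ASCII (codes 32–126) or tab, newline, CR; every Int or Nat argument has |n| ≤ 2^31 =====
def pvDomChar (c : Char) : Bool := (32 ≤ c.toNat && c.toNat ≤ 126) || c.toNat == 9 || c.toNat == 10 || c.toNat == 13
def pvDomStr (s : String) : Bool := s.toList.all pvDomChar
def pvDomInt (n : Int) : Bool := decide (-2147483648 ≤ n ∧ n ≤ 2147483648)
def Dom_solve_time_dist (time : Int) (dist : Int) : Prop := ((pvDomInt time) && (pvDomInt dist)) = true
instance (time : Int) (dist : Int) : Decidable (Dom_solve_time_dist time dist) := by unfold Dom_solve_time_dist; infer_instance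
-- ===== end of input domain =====

-- B replaces the linear scan with a binary search for the first winning press
-- (the distance curve is concave), getting the last by symmetry; objective: faster.

-- ===== PORT A =====
def calc_dist (speed : Int) (time_left : Int) : Int := speed * time_left

def solve_time_dist (time : Int) (dist : Int) : List Int :=
  (PySem.List.pyRange 0 time 1).foldl
    (fun results button_press_duration =>
      let time_left := time - button_press_duration
      let result := calc_dist button_press_duration time_left
      if result > dist then results ++ [button_press_duration] else results)
    []

-- ===== PORT B =====
-- Source B's helper _mid
def pvMid (lo : Int) (hi : Int) : Int := PySem.Int.floordiv (lo + hi) 2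

theorem pvMid_bounds (lo hi : Int) (h : lo < hi) : lo ≤ pvMid lo hi ∧ pvMid lo hi < hi := by
  unfold pvMid
  rw [PySem.Int.floordiv_eq_ediv_of_pos (by omega : (0:Int) < 2)]
  omega

-- the `while lo < hi` binary-search loop of Source B, recursion on the shrinking gap
def pvBSearch (time : Int) (dist : Int) (lo : Int) (hi : Int) : Int :=
  if h : lo < hi then
    if (pvMid lo hi) * (time - pvMid lo hi) > dist then pvBSearch time dist lo (pvMid lo hi)
    else pvBSearch time dist (pvMid lo hi + 1) hi
  else lo
termination_by (hi - lo).toNat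
decreasing_by
  · have := pvMid_bounds lo hi h; omega
  · have := pvMid_bounds lo hi h; omega

def solve_time_dist_alt (time : Int) (dist : Int) : List Int :=
  if time ≤ 0 then []
  else
    let mid := PySem.Int.floordiv time 2
    if mid * (time - mid) ≤ dist then []
    else
      let first := pvBSearch time dist 0 mid
      let last := if first > 0 then time - first else time - 1
      PySem.List.pyRange first (last + 1) 1

-- ===== PRECONDITION & SPEC =====
def Spec_solve_time_dist (time : Int) (dist : Int) (out : List Int) : Prop := out = solve_time_dist_alt time dist
instance (time : Int) (dist : Int) (out : List Int) : Decidable (Spec_solve_time_dist time dist out) := by unfold Spec_solve_time_dist; infer_instance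

-- ===== CLAIM (what is proved, stated in full; the proofs are below) =====
def Claim_equal_solve_time_dist : Prop := ∀ (time : Int) (dist : Int), Dom_solve_time_dist time dist → Spec_solve_time_dist time dist (solve_time_dist time dist)

-- ===== LEMMAS AND PROOFS =====

-- f(b) = b*(time-b) is nondecreasing while a ≤ b and a + b ≤ time
theorem pv_mono (time a b : Int) (hab : a ≤ b) (hsum : a + b ≤ time) :
    a * (time - a) ≤ b * (time - b) := by
  nlinarith [mul_nonneg (by omega : (0:Int) ≤ b - a) (by omega : (0:Int) ≤ time - a - b)]

-- symmetry f(b) = f(time-b)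
theorem pv_symm (time b : Int) : b * (time - b) = (time - b) * (time - (time - b)) := by ring

-- binary-search specification, by induction on the gap
theorem pvBSearch_spec_aux (time dist : Int) (n : Nat) :
    ∀ (lo hi : Int), (hi - lo).toNat ≤ n → 0 ≤ lo → lo ≤ hi → 2 * hi ≤ time →
    hi * (time - hi) > dist → (∀ j, 0 ≤ j → j < lo → j * (time - j) ≤ dist) →
    lo ≤ pvBSearch time dist lo hi ∧ pvBSearch time dist lo hi ≤ hi ∧
    (pvBSearch time dist lo hi) * (time - pvBSearch time dist lo hi) > dist ∧
    (∀ j, 0 ≤ j → j < pvBSearch time dist lo hi → j * (time - j) ≤ dist) := by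
  induction n with
  | zero =>
    intro lo hi hn h0 hlh hhi2 hwin hlose
    have heq : lo = hi := by omega
    rw [pvBSearch, dif_neg (by omega : ¬ lo < hi)]
    refine ⟨le_refl _, hlh, ?_, hlose⟩
    rw [heq]; exact hwin
  | succ n ih =>
    intro lo hi hn h0 hlh hhi2 hwin hlose
    by_cases h : lo < hi
    · have hb := pvMid_bounds lo hi h
      rw [pvBSearch, dif_pos h]
      by_cases hm : (pvMid lo hi) * (time - pvMid lo hi) > dist
      · rw [if_pos hm]
        have := ih lo (pvMid lo hi) (by omega) h0 hb.1 (by omega) hm hlose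
        exact ⟨this.1, le_trans this.2.1 (le_of_lt hb.2), this.2.2⟩
      · rw [if_neg hm]
        have hm' : (pvMid lo hi) * (time - pvMid lo hi) ≤ dist := by omega
        have hlose' : ∀ j, 0 ≤ j → j < pvMid lo hi + 1 → j * (time - j) ≤ dist := by
          intro j hj0 hjm
          calc j * (time - j) ≤ (pvMid lo hi) * (time - pvMid lo hi) :=
                pv_mono time j (pvMid lo hi) (by omega) (by omega)
            _ ≤ dist := hm'
        have := ih (pvMid lo hi + 1) hi (by omega) (by omega) (by omega) hhi2 hwin hlose'
        exact ⟨by omega, this.2⟩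
    · rw [pvBSearch, dif_neg h]
      have heq : lo = hi := by omega
      refine ⟨le_refl _, hlh, ?_, hlose⟩
      rw [heq]; exact hwin

-- A is the filter of the full range
theorem pvA_eq_filter (time dist : Int) :
    solve_time_dist time dist =
      (PySem.List.pyRange 0 time 1).filter (fun b => decide (b * (time - b) > dist)) := by
  unfold solve_time_dist calc_dist
  simpa using PySem.List.foldl_append_ite_eq_filter
    (l := PySem.List.pyRange 0 time 1) (acc := []) (p := fun b => b * (time - b) > dist)

-- filtering a range by a predicate that holds exactly on a sub-interval yields the sub-range
theorem pv_filter_range (p : Int → Bool) (a b lo hi : Int)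
    (hal : a ≤ lo) (hlh : lo ≤ hi + 1) (hhb : hi < b)
    (hp : ∀ x, a ≤ x → x < b → (p x = true ↔ lo ≤ x ∧ x ≤ hi)) :
    (PySem.List.pyRange a b 1).filter p = PySem.List.pyRange lo (hi + 1) 1 := by
  rw [PySem.List.pyRange_one_append a lo b hal (by omega),
      PySem.List.pyRange_one_append lo (hi+1) b hlh (by omega)]
  rw [List.filter_append, List.filter_append]
  have h1 : (PySem.List.pyRange a lo 1).filter p = [] := by
    rw [List.filter_eq_nil_iff]
    intro x hx
    rw [PySem.List.mem_pyRange_one] at hx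
    intro hpx
    exact absurd ((hp x (by omega) (by omega)).mp hpx).1 (by omega)
  have h2 : (PySem.List.pyRange lo (hi+1) 1).filter p = PySem.List.pyRange lo (hi+1) 1 := by
    rw [List.filter_eq_self]
    intro x hx
    rw [PySem.List.mem_pyRange_one] at hx
    exact (hp x (by omega) (by omega)).mpr ⟨hx.1, by omega⟩
  have h3 : (PySem.List.pyRange (hi+1) b 1).filter p = [] := by
    rw [List.filter_eq_nil_iff]
    intro x hx
    rw [PySem.List.mem_pyRange_one] at hx
    intro hpx
    exact absurd ((hp x (by omega) (by omega)).mp hpx).2 (by omega)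
  rw [h1, h2, h3, List.nil_append, List.append_nil]

-- ===== VERDICT (by name: the statement is the Claim_ definition above) =====
theorem solve_time_dist_spec : Claim_equal_solve_time_dist := by
  intro time dist _
  show solve_time_dist time dist = solve_time_dist_alt time dist
  rw [pvA_eq_filter]
  simp only [solve_time_dist_alt]
  by_cases ht : time ≤ 0
  · rw [if_pos ht, PySem.List.pyRange_one_eq_nil (by omega)]; rfl
  · rw [if_neg ht]
    have ht' : 0 < time := by omega
    have hmid : 2 * PySem.Int.floordiv time 2 ≤ time ∧
        time ≤ 2 * PySem.Int.floordiv time 2 + 1 ∧ 0 ≤ PySem.Int.floordiv time 2 := by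
      rw [PySem.Int.floordiv_eq_ediv_of_pos (by omega : (0:Int) < 2)]; omega
    set mid := PySem.Int.floordiv time 2 with hmiddef
    by_cases hpeak : mid * (time - mid) ≤ dist
    · rw [if_pos hpeak]
      rw [List.filter_eq_nil_iff]
      intro x hx
      rw [PySem.List.mem_pyRange_one] at hx
      intro hpx
      rw [decide_eq_true_eq] at hpx
      have hle : x * (time - x) ≤ dist := by
        by_cases hxm : x ≤ mid
        · calc x * (time - x) ≤ mid * (time - mid) := pv_mono time x mid hxm (by omega)
            _ ≤ dist := hpeak
        · rw [pv_symm time x]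
          calc (time - x) * (time - (time - x)) ≤ mid * (time - mid) :=
                pv_mono time (time - x) mid (by omega) (by omega)
            _ ≤ dist := hpeak
      omega
    · rw [if_neg hpeak]
      have hpeak' : dist < mid * (time - mid) := not_le.mp hpeak
      obtain ⟨hf1, hf2, hfwin, hflose⟩ :=
        pvBSearch_spec_aux time dist (mid - 0).toNat 0 mid (le_refl _) (le_refl 0)
          hmid.2.2 hmid.1 hpeak' (by omega)
      set first := pvBSearch time dist 0 mid with hfirstdef
      by_cases hf0 : first > 0
      · rw [if_pos hf0]
        apply pv_filter_range _ _ _ first (time - first) hf1 (by omega) (by omega)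
        intro x hx0 hxt
        rw [decide_eq_true_eq]
        constructor
        · intro hwin
          constructor
          · by_contra hlt
            exact absurd hwin (not_lt.mpr (hflose x hx0 (by omega)))
          · by_contra hgt
            rw [pv_symm time x] at hwin
            exact absurd hwin (not_lt.mpr (hflose (time - x) (by omega) (by omega)))
        · rintro ⟨hxl, hxr⟩
          calc dist < first * (time - first) := hfwin
            _ ≤ x * (time - x) := by
                nlinarith [mul_nonneg (by omega : (0:Int) ≤ x - first)
                  (by omega : (0:Int) ≤ time - first - x)]
      · rw [if_neg hf0]
        have hfz : first = 0 := by omega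
        have hdneg : dist < 0 := by rw [hfz] at hfwin; simpa using hfwin
        rw [hfz]
        apply pv_filter_range _ _ _ 0 (time - 1) (le_refl 0) (by omega) (by omega)
        intro x hx0 hxt
        rw [decide_eq_true_eq]
        constructor
        · intro _; exact ⟨hx0, by omega⟩
        · intro _
          calc dist < 0 := hdneg
            _ ≤ x * (time - x) := mul_nonneg hx0 (by omega)
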